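-- pv_equiv track=rewrite | github.com/KforKuma/BioinfoUtilityPackage | src/external_adapter/xgboost/xgb_analysis_utils.py | get_internal_clusters
-- ===== SOURCE A (Python) =====
-- def get_internal_clusters(Z, n_leaves):
--     """
--     遍历 linkage 矩阵，返回每个内部节点对应的叶子 index 列表
--     """
--     clusters = {}
--     for i, row in enumerate(Z):
--         left, right = int(row[0]), int(row[1])
--         if left < n_leaves:
--             left_leaves = [left]
--         else:
--             left_leaves = clusters[left]
--         if right < n_leaves:
--             right_leaves = [right]
--         else:
--             right_leaves = clusters[right]
--         clusters[i + n_leaves] = left_leaves + right_leaves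
--     return clusters  # key = cluster index, value = list of leaf indices
-- ===== SOURCE B (Python) =====
-- def get_internal_clusters(Z, n_leaves):
--     """Top-down: derive each internal node's leaf list by an explicit-stack
--     traversal of the linkage tree, instead of A's bottom-up dict propagation."""
--     def leaves(node):
--         out = []
--         stack = [node]
--         while stack:
--             nd = stack.pop()
--             if nd < n_leaves:
--                 out.append(nd)
--             else:
--                 row = Z[nd - n_leaves]
--                 stack.append(int(row[1]))
--                 stack.append(int(row[0]))
--         return out
--     return {i + n_leaves: leaves(i + n_leaves) for i in range(len(Z))}
-- ===== Notes on version B (the rewrite author's own statement) =====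
-- stated objective: alternative
-- what changed: Replaced A's bottom-up single scan that propagates leaf lists through a dict with a top-down explicit-stack tree traversal computed independently for each internal node.
import Mathlib
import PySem

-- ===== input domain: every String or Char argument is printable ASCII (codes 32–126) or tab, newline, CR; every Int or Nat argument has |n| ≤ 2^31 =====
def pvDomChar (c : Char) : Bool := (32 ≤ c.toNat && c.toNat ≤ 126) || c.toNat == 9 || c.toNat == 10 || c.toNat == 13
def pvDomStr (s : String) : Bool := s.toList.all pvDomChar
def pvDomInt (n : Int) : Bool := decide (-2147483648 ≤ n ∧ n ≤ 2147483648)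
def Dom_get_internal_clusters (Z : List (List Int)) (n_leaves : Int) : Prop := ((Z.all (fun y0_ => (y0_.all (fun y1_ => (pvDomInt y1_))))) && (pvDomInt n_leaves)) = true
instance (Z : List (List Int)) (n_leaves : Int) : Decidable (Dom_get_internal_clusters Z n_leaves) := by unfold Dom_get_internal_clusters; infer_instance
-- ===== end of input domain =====

-- B replaces A's bottom-up dict propagation by an independent top-down explicit-stack
-- traversal per internal node (alternative decomposition, same asymptotic cost).

-- ===== PORT A =====
-- clusters[left] (Python raises KeyError when the key is missing) is ported as getD with
-- default []; row[0]/row[1] (IndexError when the row is short) as pyGetD with default 0.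
-- Pre_ excludes exactly the raising inputs, so the defaults are never reached under Pre_.
def get_internal_clusters (Z : List (List Int)) (n_leaves : Int) : List (Int × List Int) :=
  ((PySem.List.enumerate Z 0).foldl
    (fun clusters p =>
      let i := p.1
      let row := p.2
      let left := PySem.List.pyGetD row 0 0
      let right := PySem.List.pyGetD row 1 0
      let left_leaves := if left < n_leaves then [left] else clusters.getD left []
      let right_leaves := if right < n_leaves then [right] else clusters.getD right []
      clusters.insert (i + n_leaves) (left_leaves ++ right_leaves))
    PySem.Dict.empty).items

-- ===== PORT B =====
-- the while-loop over the explicit stack of Source B; the stack's top is the list head.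
-- fuel (2 ^ (Z.length + 2) at the call site, always sufficient under Pre_) only makes
-- the loop total in Lean; it mirrors no branch of Source B.
def pvLeaves (Z : List (List Int)) (n_leaves : Int) : Nat → List Int → List Int → List Int
  | 0, _, out => out
  | _ + 1, [], out => out
  | fuel + 1, nd :: stack, out =>
    if nd < n_leaves then
      pvLeaves Z n_leaves fuel stack (out ++ [nd])
    else
      let row := PySem.List.pyGetD Z (nd - n_leaves) []
      pvLeaves Z n_leaves fuel
        (PySem.List.pyGetD row 0 0 :: PySem.List.pyGetD row 1 0 :: stack) out

def get_internal_clusters_alt (Z : List (List Int)) (n_leaves : Int) : List (Int × List Int) :=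
  ((PySem.List.pyRange 0 (PySem.List.len Z) 1).foldl
    (fun d i => d.insert (i + n_leaves) (pvLeaves Z n_leaves (2 ^ (Z.length + 2)) [i + n_leaves] []))
    PySem.Dict.empty).items

-- ===== PRECONDITION & SPEC =====
-- Exactly the inputs on which A returns: every row has at least two entries (else
-- IndexError) and each child of row i is a leaf or an already-built internal node,
-- i.e. < n_leaves + i (else KeyError).
def Pre_get_internal_clusters (Z : List (List Int)) (n_leaves : Int) : Prop :=
  ∀ i : Nat, i < Z.length →
    2 ≤ (Z.getD i []).length ∧
    (Z.getD i []).getD 0 0 < n_leaves + i ∧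
    (Z.getD i []).getD 1 0 < n_leaves + i
instance (Z : List (List Int)) (n_leaves : Int) : Decidable (Pre_get_internal_clusters Z n_leaves) := by
  unfold Pre_get_internal_clusters; infer_instance

def pvWitness_get_internal_clusters : List (List Int) × Int := ([[0, 1, 0, 0], [2, 3, 0, 0]], 3)

def Spec_get_internal_clusters (Z : List (List Int)) (n_leaves : Int) (out : List (Int × List Int)) : Prop := out = get_internal_clusters_alt Z n_leaves
instance (Z : List (List Int)) (n_leaves : Int) (out : List (Int × List Int)) : Decidable (Spec_get_internal_clusters Z n_leaves out) := by unfold Spec_get_internal_clusters; infer_instance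

-- ===== CLAIM (what is proved, stated in full; the proofs are below) =====
def Claim_equal_get_internal_clusters : Prop := ∀ (Z : List (List Int)) (n_leaves : Int), Dom_get_internal_clusters Z n_leaves → Pre_get_internal_clusters Z n_leaves → Spec_get_internal_clusters Z n_leaves (get_internal_clusters Z n_leaves)

-- ===== LEMMAS AND PROOFS =====

-- the leaf list of internal node i, defined by structural recursion (proof device)
def pvV (Z : List (List Int)) (n : Int) (i : Nat) : List Int :=
  let row := Z.getD i []
  let l := row.getD 0 0
  let r := row.getD 1 0
  (if hl : (l - n).toNat < i ∧ n ≤ l then pvV Z n (l - n).toNat else [l]) ++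
  (if hr : (r - n).toNat < i ∧ n ≤ r then pvV Z n (r - n).toNat else [r])
termination_by i
decreasing_by exacts [hl.1, hr.1]

-- number of stack pops pvLeaves spends on internal node i
def pvC (Z : List (List Int)) (n : Int) (i : Nat) : Nat :=
  let row := Z.getD i []
  let l := row.getD 0 0
  let r := row.getD 1 0
  1 + (if hl : (l - n).toNat < i ∧ n ≤ l then pvC Z n (l - n).toNat else 1) +
      (if hr : (r - n).toNat < i ∧ n ≤ r then pvC Z n (r - n).toNat else 1)
termination_by i
decreasing_by exacts [hl.1, hr.1]

def pvCN (Z : List (List Int)) (n : Int) (nd : Int) : Nat :=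
  if nd < n then 1 else pvC Z n (nd - n).toNat

def pvLf (Z : List (List Int)) (n : Int) (nd : Int) : List Int :=
  if nd < n then [nd] else pvV Z n (nd - n).toNat

theorem pvC_lt (Z : List (List Int)) (n : Int) (i : Nat) : pvC Z n i < 2 ^ (i + 2) := by
  induction i using Nat.strong_induction_on with
  | _ i ih =>
    rw [pvC]
    have h2 : ∀ j, j < i → pvC Z n j < 2 ^ (i + 1) := by
      intro j hj
      calc pvC Z n j < 2 ^ (j + 2) := ih j hj
        _ ≤ 2 ^ (i + 1) := Nat.pow_le_pow_right (by norm_num) (by omega)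
    have hpow : 2 ^ (i + 2) = 2 ^ (i + 1) + 2 ^ (i + 1) := by ring
    have h1 : (1 : Nat) ≤ 2 ^ (i + 1) := Nat.one_le_two_pow
    split_ifs with hl hr hr
    · have := h2 _ hl.1; have := h2 _ hr.1; omega
    · have := h2 _ hl.1; omega
    · have := h2 _ hr.1; omega
    · omega

theorem pvC_pos (Z : List (List Int)) (n : Int) (i : Nat) : 1 ≤ pvC Z n i := by
  rw [pvC]
  omega

theorem pvCN_pos (Z : List (List Int)) (n : Int) (nd : Int) : 1 ≤ pvCN Z n nd := by
  unfold pvCN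
  split_ifs
  · omega
  · exact pvC_pos Z n _

-- main loop lemma for B's stack traversal
theorem pvLeaves_spec (Z : List (List Int)) (n : Int)
    (hpre : Pre_get_internal_clusters Z n) :
    ∀ (fuel : Nat) (stack out : List Int),
      (∀ nd ∈ stack, nd < n + Z.length) →
      (stack.map (pvCN Z n)).sum ≤ fuel →
      pvLeaves Z n fuel stack out = out ++ stack.flatMap (pvLf Z n) := by
  intro fuel
  induction fuel with
  | zero =>
    intro stack out hv hc
    cases stack with
    | nil => simp [pvLeaves]
    | cons nd rest =>
      exfalso
      have h1 := pvCN_pos Z n nd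
      have h2 : (List.map (pvCN Z n) (nd :: rest)).sum
          = pvCN Z n nd + (List.map (pvCN Z n) rest).sum := by
        simp
      omega
  | succ f ih =>
    intro stack out hv hc
    cases stack with
    | nil => simp [pvLeaves]
    | cons nd rest =>
      have hsum : (List.map (pvCN Z n) (nd :: rest)).sum
          = pvCN Z n nd + (List.map (pvCN Z n) rest).sum := by
        simp
      by_cases hnd : nd < n
      · have hcn : pvCN Z n nd = 1 := by unfold pvCN; rw [if_pos hnd]
        rw [pvLeaves, if_pos hnd,
            ih rest (out ++ [nd]) (fun x hx => hv x (List.mem_cons_of_mem _ hx)) (by omega)]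
        simp [pvLf, hnd, List.flatMap_cons]
      · -- internal node
        have hnle : n ≤ nd := le_of_not_gt hnd
        have hlt : nd < n + Z.length := hv nd List.mem_cons_self
        set j : Nat := (nd - n).toNat with hj
        have hjlt : j < Z.length := by omega
        have hrow : PySem.List.pyGetD Z (nd - n) [] = Z.getD j [] := by
          rw [PySem.List.pyGetD_eq_getElem Z [] (by omega) (by omega)]
          rw [List.getD_eq_getElem Z [] hjlt]
        obtain ⟨hlen, hb1, hb2⟩ := hpre j hjlt
        set row := Z.getD j [] with hrowdef
        have hg0 : PySem.List.pyGetD row 0 0 = row.getD 0 0 := PySem.List.pyGetD_zero row 0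
        have hg1 : PySem.List.pyGetD row 1 0 = row.getD 1 0 := PySem.List.pyGetD_ofNat' row 1 0
        set c1 := row.getD 0 0 with hc1d
        set c2 := row.getD 1 0 with hc2d
        have hstep : pvLeaves Z n (f + 1) (nd :: rest) out
            = pvLeaves Z n f (c1 :: c2 :: rest) out := by
          rw [pvLeaves, if_neg hnd]
          simp only [hrow, hg0, hg1]
        have hx1 : (if _ : (c1 - n).toNat < j ∧ n ≤ c1 then pvC Z n (c1 - n).toNat else 1)
            = pvCN Z n c1 := by
          unfold pvCN
          split_ifs with h h' h' <;> first | rfl | omega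
        have hx2 : (if _ : (c2 - n).toNat < j ∧ n ≤ c2 then pvC Z n (c2 - n).toNat else 1)
            = pvCN Z n c2 := by
          unfold pvCN
          split_ifs with h h' h' <;> first | rfl | omega
        have hy1 : (if _ : (c1 - n).toNat < j ∧ n ≤ c1 then pvV Z n (c1 - n).toNat else [c1])
            = pvLf Z n c1 := by
          unfold pvLf
          split_ifs with h h' h' <;> first | rfl | omega
        have hy2 : (if _ : (c2 - n).toNat < j ∧ n ≤ c2 then pvV Z n (c2 - n).toNat else [c2])
            = pvLf Z n c2 := by
          unfold pvLf
          split_ifs with h h' h' <;> first | rfl | omega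
        have hcnd : pvCN Z n nd = 1 + pvCN Z n c1 + pvCN Z n c2 := by
          have e1 : pvCN Z n nd = pvC Z n j := by
            unfold pvCN
            rw [if_neg hnd, ← hj]
          rw [e1, pvC]
          simp only [← hrowdef, ← hc1d, ← hc2d, hx1, hx2]
        have hlfnd : pvLf Z n nd = pvLf Z n c1 ++ pvLf Z n c2 := by
          have e1 : pvLf Z n nd = pvV Z n j := by
            unfold pvLf
            rw [if_neg hnd, ← hj]
          rw [e1, pvV]
          simp only [← hrowdef, ← hc1d, ← hc2d, hy1, hy2]
        rw [hstep, ih (c1 :: c2 :: rest) out]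
        · simp [List.flatMap_cons, hlfnd]
        · intro x hx
          simp only [List.mem_cons] at hx
          rcases hx with h | h | h
          · omega
          · omega
          · exact hv x (List.mem_cons_of_mem _ h)
        · have hsum2 : (List.map (pvCN Z n) (c1 :: c2 :: rest)).sum
              = pvCN Z n c1 + (pvCN Z n c2 + (List.map (pvCN Z n) rest).sum) := by
            simp
          omega

theorem pvLeaves_top (Z : List (List Int)) (n : Int)
    (hpre : Pre_get_internal_clusters Z n) (i : Nat) (hi : i < Z.length) :
    pvLeaves Z n (2 ^ (Z.length + 2)) [(i : Int) + n] [] = pvV Z n i := by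
  rw [pvLeaves_spec Z n hpre _ _ _ (by intro nd hnd; simp at hnd; omega)]
  · have hlf : pvLf Z n ((i : Int) + n) = pvV Z n i := by
      unfold pvLf
      rw [if_neg (by omega)]
      congr 1
      omega
    simp [List.flatMap_cons, hlf]
  · have h1 : pvCN Z n ((i : Int) + n) = pvC Z n i := by
      unfold pvCN
      rw [if_neg (by omega)]
      congr 1
      omega
    have h2 := pvC_lt Z n i
    have h3 : (2 : Nat) ^ (i + 2) ≤ 2 ^ (Z.length + 2) :=
      Nat.pow_le_pow_right (by norm_num) (by omega)
    simp only [List.map_cons, List.map_nil, List.sum_cons, List.sum_nil, h1]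
    omega

-- A's dict after m rows: items are [(n+0, pvV 0), ..., (n+m-1, pvV (m-1))]
theorem foldA_items (Z : List (List Int)) (n : Int)
    (hpre : Pre_get_internal_clusters Z n) :
    ∀ m, m ≤ Z.length →
      ((PySem.List.enumerate (Z.take m) 0).foldl
        (fun clusters p =>
          let i := p.1
          let row := p.2
          let left := PySem.List.pyGetD row 0 0
          let right := PySem.List.pyGetD row 1 0
          let left_leaves := if left < n then [left] else clusters.getD left []
          let right_leaves := if right < n then [right] else clusters.getD right []
          clusters.insert (i + n) (left_leaves ++ right_leaves))
        PySem.Dict.empty).items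
      = (List.range m).map (fun (i : Nat) => ((i : Int) + n, pvV Z n i)) := by
  intro m
  induction m with
  | zero => intro _; simp [PySem.Dict.empty]
  | succ m ih =>
    intro hm
    have hmlt : m < Z.length := by omega
    have htake : Z.take (m + 1) = Z.take m ++ [Z[m]] := by
      rw [List.take_add_one, List.getElem?_eq_getElem hmlt]
      rfl
    rw [htake, PySem.List.enumerate_append, List.foldl_append]
    have hstart : ((0 : Int) + (Z.take m).length) = (m : Int) := by
      simp [List.length_take, Nat.min_eq_left (le_of_lt hmlt)]
    rw [hstart, PySem.List.enumerate_cons, PySem.List.enumerate_nil, List.foldl_cons, List.foldl_nil]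
    set D := ((PySem.List.enumerate (Z.take m) 0).foldl
        (fun clusters p =>
          let i := p.1
          let row := p.2
          let left := PySem.List.pyGetD row 0 0
          let right := PySem.List.pyGetD row 1 0
          let left_leaves := if left < n then [left] else clusters.getD left []
          let right_leaves := if right < n then [right] else clusters.getD right []
          clusters.insert (i + n) (left_leaves ++ right_leaves))
        PySem.Dict.empty) with hD
    have hitems : D.items = (List.range m).map (fun (i : Nat) => ((i : Int) + n, pvV Z n i)) :=
      ih (le_of_lt hmlt)
    have hkeys : D.keys = (List.range m).map (fun (i : Nat) => ((i : Int) + n)) := by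
      simp only [PySem.Dict.keys, hitems, List.map_map]
      rfl
    have hnodup : D.keys.Nodup := by
      rw [hkeys]
      refine List.Nodup.map ?_ List.nodup_range
      intro a b h
      dsimp only at h
      omega
    have hget : ∀ jn : Int, n ≤ jn → jn < n + m → D.getD jn [] = pvV Z n (jn - n).toNat := by
      intro jn h1 h2
      set j : Nat := (jn - n).toNat with hjd
      have hjm : j < m := by omega
      have hc' : ((j : Int) + n) = jn := by omega
      rw [← hc']
      exact PySem.Dict.getD_of_mem_items D
        (hitems ▸ List.mem_map.mpr ⟨j, List.mem_range.mpr hjm, rfl⟩) hnodup []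
    have hfresh : D.contains ((m : Int) + n) = false := by
      rw [PySem.Dict.contains_eq_decide_mem_keys, hkeys]
      simp only [decide_eq_false_iff_not, List.mem_map, List.mem_range]
      rintro ⟨j, hjm, hje⟩
      omega
    obtain ⟨hlen, hb1, hb2⟩ := hpre m hmlt
    have hrowD : Z.getD m [] = Z[m] := List.getD_eq_getElem Z [] hmlt
    have hg0 : PySem.List.pyGetD Z[m] 0 0 = (Z.getD m []).getD 0 0 := by
      rw [← hrowD]; exact PySem.List.pyGetD_zero _ 0
    have hg1 : PySem.List.pyGetD Z[m] 1 0 = (Z.getD m []).getD 1 0 := by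
      rw [← hrowD]; exact PySem.List.pyGetD_ofNat' _ 1 0
    have hval : (if PySem.List.pyGetD Z[m] 0 0 < n then [PySem.List.pyGetD Z[m] 0 0]
                   else D.getD (PySem.List.pyGetD Z[m] 0 0) []) ++
                (if PySem.List.pyGetD Z[m] 1 0 < n then [PySem.List.pyGetD Z[m] 1 0]
                   else D.getD (PySem.List.pyGetD Z[m] 1 0) []) = pvV Z n m := by
      rw [hg0, hg1, pvV]
      congr 1
      · set c := (Z.getD m []).getD 0 0 with hcd
        by_cases hcn : c < n
        · rw [if_pos hcn, dif_neg (by omega)]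
        · rw [if_neg hcn, dif_pos (by omega), hget c (by omega) (by omega)]
      · set c := (Z.getD m []).getD 1 0 with hcd
        by_cases hcn : c < n
        · rw [if_pos hcn, dif_neg (by omega)]
        · rw [if_neg hcn, dif_pos (by omega), hget c (by omega) (by omega)]
    simp only [List.range_succ, List.map_append, List.map_cons, List.map_nil]
    rw [← hitems, ← hval]
    exact PySem.Dict.items_insert_of_not_contains _ _ hfresh

-- B's items are the same list
theorem foldB_items (Z : List (List Int)) (n : Int)
    (hpre : Pre_get_internal_clusters Z n) :
    get_internal_clusters_alt Z n
      = (List.range Z.length).map (fun (i : Nat) => ((i : Int) + n, pvV Z n i)) := by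
  unfold get_internal_clusters_alt
  rw [PySem.List.len_eq, PySem.List.pyRange_zero_natCast]
  rw [PySem.Dict.items_foldl_insert_fresh _ _ _ _
        (by intro a _; exact PySem.Dict.contains_empty _)
        (by
          rw [List.map_map]
          refine List.Nodup.map ?_ List.nodup_range
          intro a b h
          simp only [Function.comp] at h
          omega)]
  rw [List.map_map]
  have hempty : (PySem.Dict.empty : PySem.Dict Int (List Int)).items = [] := rfl
  rw [hempty, List.nil_append]
  apply List.map_congr_left
  intro i hi
  have hi' : i < Z.length := List.mem_range.mp hi
  simp only [Function.comp]
  rw [pvLeaves_top Z n hpre i hi']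

-- ===== VERDICT (by name: the statement is the Claim_ definition above) =====
theorem get_internal_clusters_spec : Claim_equal_get_internal_clusters := by
  intro Z n _ hpre
  unfold Spec_get_internal_clusters
  unfold get_internal_clusters
  have hA := foldA_items Z n hpre Z.length (le_refl _)
  rw [List.take_length] at hA
  rw [hA, foldB_items Z n hpre]
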